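-- pv_equiv track=rewrite | github.com/MartinBombar/D-Wave-open | Max_Cut/MaxcutAfinir.py | max_cut_qubo
-- ===== SOURCE A (Python) =====
-- def max_cut_qubo(adjacency_matrix):
--     """
--     Create a QUBO dictionary for the Max-Cut problem from an adjacency matrix.
--
--     :param adjacency_matrix: A list of lists representing the adjacency matrix.
--     :return: A QUBO dictionary.
--     """
--     num_nodes = len(adjacency_matrix)
--     Q = {}
--
--     for i in range(num_nodes):
--         for j in range(i+1, num_nodes):
--             if adjacency_matrix[i][j] == 1:
--                 Q[(i, i)] = Q.get((i, i), 0) - 1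
--                 Q[(j, j)] = Q.get((j, j), 0) - 1
--                 Q[(i, j)] = Q.get((i, j), 0) + 2
--
--     return Q
-- ===== SOURCE B (Python) =====
-- def max_cut_qubo(adjacency_matrix):
--     """
--     Create a QUBO dictionary for the Max-Cut problem from an adjacency matrix.
--     Decomposition: collect the edge list first, tally degrees from it, then
--     assemble the dictionary with final values (no incremental get-and-update).
--     """
--     n = len(adjacency_matrix)
--     edges = [(i, j)
--              for i in range(n)
--              for j in range(i + 1, n)
--              if adjacency_matrix[i][j] == 1]
--     deg = {}
--     for i, j in edges:
--         deg[i] = deg.get(i, 0) + 1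
--         deg[j] = deg.get(j, 0) + 1
--     Q = {}
--     for i, j in edges:
--         Q[(i, i)] = -deg[i]
--         Q[(j, j)] = -deg[j]
--         Q[(i, j)] = 2
--     return Q
-- ===== Notes on version B (the rewrite author's own statement) =====
-- stated objective: alternative
-- what changed: A fills the QUBO dict in one fused upper-triangle loop that repeatedly gets-and-decrements/increments entries; B first collects the edge list, then tallies degrees from it into a table, then assembles the dict in one pass writing final values (-deg[i] on the diagonal, 2 per edge) directly.
import Mathlib
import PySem

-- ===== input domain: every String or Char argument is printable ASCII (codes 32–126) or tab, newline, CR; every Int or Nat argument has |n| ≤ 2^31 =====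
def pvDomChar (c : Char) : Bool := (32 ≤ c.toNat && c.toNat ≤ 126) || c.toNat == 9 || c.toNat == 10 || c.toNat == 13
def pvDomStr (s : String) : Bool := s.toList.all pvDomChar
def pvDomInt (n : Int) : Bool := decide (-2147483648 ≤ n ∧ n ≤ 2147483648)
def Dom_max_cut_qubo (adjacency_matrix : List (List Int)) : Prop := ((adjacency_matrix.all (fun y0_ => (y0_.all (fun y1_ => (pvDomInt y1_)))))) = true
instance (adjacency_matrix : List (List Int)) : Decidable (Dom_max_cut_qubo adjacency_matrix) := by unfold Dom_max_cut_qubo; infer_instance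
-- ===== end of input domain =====

-- B builds the Max-Cut QUBO in three passes (edge list, degree table, assembly with final
-- values) instead of A's single fused loop that repeatedly gets-and-updates the dict.

-- ===== PORT A =====
def max_cut_qubo (adjacency_matrix : List (List Int)) : List (Int × Int × Int) :=
  let n : Int := adjacency_matrix.length
  let Q : PySem.Dict (Int × Int) Int :=
    (PySem.List.pyRange 0 n 1).foldl (fun Q i =>
      (PySem.List.pyRange (i + 1) n 1).foldl (fun Q j =>
        if PySem.List.pyGetD (PySem.List.pyGetD adjacency_matrix i []) j 0 = 1 then
          let Q1 := Q.insert (i, i) (Q.getD (i, i) 0 - 1)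
          let Q2 := Q1.insert (j, j) (Q1.getD (j, j) 0 - 1)
          Q2.insert (i, j) (Q2.getD (i, j) 0 + 2)
        else Q) Q) PySem.Dict.empty
  Q.items.map (fun p => (p.1.1, p.1.2, p.2))

-- ===== PORT B =====
def max_cut_qubo_alt (adjacency_matrix : List (List Int)) : List (Int × Int × Int) :=
  let n : Int := adjacency_matrix.length
  let edges : List (Int × Int) :=
    (PySem.List.pyRange 0 n 1).flatMap (fun i =>
      ((PySem.List.pyRange (i + 1) n 1).filter (fun j =>
        PySem.List.pyGetD (PySem.List.pyGetD adjacency_matrix i []) j 0 = 1)).map (fun j => (i, j)))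
  let deg : PySem.Dict Int Int :=
    edges.foldl (fun d e =>
      let d1 := d.insert e.1 (d.getD e.1 0 + 1)
      d1.insert e.2 (d1.getD e.2 0 + 1)) PySem.Dict.empty
  let Q : PySem.Dict (Int × Int) Int :=
    edges.foldl (fun Q e =>
      ((Q.insert (e.1, e.1) (-(deg.getD e.1 0))).insert (e.2, e.2) (-(deg.getD e.2 0))).insert
        (e.1, e.2) 2) PySem.Dict.empty
  Q.items.map (fun p => (p.1.1, p.1.2, p.2))

-- ===== PRECONDITION & SPEC =====
-- Pre_ excludes exactly the inputs where A raises IndexError: every row except possibly the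
-- last is read at every column index up to n-1, so it must have length ≥ n.
def Pre_max_cut_qubo (adjacency_matrix : List (List Int)) : Prop :=
  ∀ p ∈ adjacency_matrix.zipIdx,
    p.2 + 2 ≤ adjacency_matrix.length → adjacency_matrix.length ≤ p.1.length
instance (adjacency_matrix : List (List Int)) : Decidable (Pre_max_cut_qubo adjacency_matrix) := by
  unfold Pre_max_cut_qubo; infer_instance

def pvWitness_max_cut_qubo : List (List Int) := [[0, 1], [1, 0]]

def Spec_max_cut_qubo (adjacency_matrix : List (List Int)) (out : List (Int × Int × Int)) : Prop := out = max_cut_qubo_alt adjacency_matrix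
instance (adjacency_matrix : List (List Int)) (out : List (Int × Int × Int)) : Decidable (Spec_max_cut_qubo adjacency_matrix out) := by unfold Spec_max_cut_qubo; infer_instance

-- ===== CLAIM (what is proved, stated in full; the proofs are below) =====
def Claim_equal_max_cut_qubo : Prop := ∀ (adjacency_matrix : List (List Int)), Dom_max_cut_qubo adjacency_matrix → Pre_max_cut_qubo adjacency_matrix → Spec_max_cut_qubo adjacency_matrix (max_cut_qubo adjacency_matrix)

-- ===== LEMMAS AND PROOFS =====

-- proof-side names for the two loop bodies and the edge list
def pvStepA (Q : PySem.Dict (Int × Int) Int) (e : Int × Int) : PySem.Dict (Int × Int) Int :=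
  let Q1 := Q.insert (e.1, e.1) (Q.getD (e.1, e.1) 0 - 1)
  let Q2 := Q1.insert (e.2, e.2) (Q1.getD (e.2, e.2) 0 - 1)
  Q2.insert (e.1, e.2) (Q2.getD (e.1, e.2) 0 + 2)

def pvStepB (deg : PySem.Dict Int Int) (Q : PySem.Dict (Int × Int) Int) (e : Int × Int) :
    PySem.Dict (Int × Int) Int :=
  ((Q.insert (e.1, e.1) (-(deg.getD e.1 0))).insert (e.2, e.2) (-(deg.getD e.2 0))).insert
    (e.1, e.2) 2

def pvEdges (m : List (List Int)) : List (Int × Int) :=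
  (PySem.List.pyRange 0 (m.length : Int) 1).flatMap (fun i =>
    ((PySem.List.pyRange (i + 1) (m.length : Int) 1).filter (fun j =>
      PySem.List.pyGetD (PySem.List.pyGetD m i []) j 0 = 1)).map (fun j => (i, j)))

def pvCnt (E : List (Int × Int)) (x : Int) : Nat :=
  (E.flatMap (fun e => [e.1, e.2])).count x

lemma pvA_eq_fold (m : List (List Int)) :
    max_cut_qubo m = ((pvEdges m).foldl pvStepA PySem.Dict.empty).items.map
      (fun p => (p.1.1, p.1.2, p.2)) := by
  unfold max_cut_qubo pvEdges
  rw [List.foldl_flatMap]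
  apply congrArg
  apply congrArg
  apply PySem.List.foldl_congr_mem
  intro acc i _
  rw [List.foldl_map, ← PySem.List.foldl_ite_eq_foldl_filter]
  rfl

lemma pvB_eq_fold (m : List (List Int)) :
    max_cut_qubo_alt m =
      ((pvEdges m).foldl
        (pvStepB ((pvEdges m).foldl (fun d e =>
          let d1 := d.insert e.1 (d.getD e.1 0 + 1)
          d1.insert e.2 (d1.getD e.2 0 + 1)) PySem.Dict.empty)) PySem.Dict.empty).items.map
        (fun p => (p.1.1, p.1.2, p.2)) := rfl

lemma pvEdges_lt (m : List (List Int)) : ∀ e ∈ pvEdges m, e.1 < e.2 := by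
  intro e he
  simp only [pvEdges, List.mem_flatMap, List.mem_map, List.mem_filter] at he
  obtain ⟨i, _, j, ⟨hj, _⟩, rfl⟩ := he
  have := PySem.List.mem_pyRange_one.mp hj
  omega

lemma pvEdges_nodup (m : List (List Int)) : (pvEdges m).Nodup := by
  unfold pvEdges
  rw [List.nodup_flatMap]
  constructor
  · intro i _
    exact (((PySem.List.nodup_pyRange_one _ _).filter _).map (by
      intro a b h; simpa using h))
  · have hp := PySem.List.pairwise_lt_pyRange_one (0 : Int) (m.length : Int)
    refine hp.imp ?_
    intro a b hab p hpa hpb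
    simp only [List.mem_map, List.mem_filter] at hpa hpb
    obtain ⟨j, _, rfl⟩ := hpa
    obtain ⟨j', _, h⟩ := hpb
    exact absurd (congrArg Prod.fst h).symm (by simp; omega)

lemma pvDeg_getD (E : List (Int × Int)) (d : PySem.Dict Int Int) (x : Int) :
    (E.foldl (fun d e =>
      let d1 := d.insert e.1 (d.getD e.1 0 + 1)
      d1.insert e.2 (d1.getD e.2 0 + 1)) d).getD x 0 = d.getD x 0 + pvCnt E x := by
  induction E generalizing d with
  | nil => simp [pvCnt]
  | cons e E ih =>
    rw [List.foldl_cons, ih]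
    simp only [pvCnt, List.flatMap_cons, List.count_append, List.count_cons, List.count_nil]
    simp only [PySem.Dict.getD_insert]
    split_ifs <;> simp_all <;> omega

lemma pvKeys_insert {κ ν : Type} [BEq κ] [LawfulBEq κ] (d : PySem.Dict κ ν) (k : κ) (v : ν) :
    (d.insert k v).keys = PySem.Set.add d.keys k := by
  by_cases h : d.contains k
  · rw [PySem.Dict.keys_insert_of_contains d v h]
    simp [PySem.Set.add, PySem.Set.contains, ← PySem.Dict.contains_iff_mem_keys, h]
  · rw [PySem.Dict.keys_insert_of_not_contains d v (by simpa using h)]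
    simp [PySem.Set.add, PySem.Set.contains, ← PySem.Dict.contains_iff_mem_keys, h]

lemma pvKeysA (E : List (Int × Int)) (q : PySem.Dict (Int × Int) Int) :
    (E.foldl pvStepA q).keys =
      E.foldl (fun s e => ((PySem.Set.add (PySem.Set.add s (e.1, e.1)) (e.2, e.2)).add (e.1, e.2)))
        q.keys := by
  induction E generalizing q with
  | nil => rfl
  | cons e E ih =>
    rw [List.foldl_cons, List.foldl_cons, ih]
    congr 1
    simp [pvStepA, pvKeys_insert]

lemma pvKeysB (deg : PySem.Dict Int Int) (E : List (Int × Int)) (q : PySem.Dict (Int × Int) Int) :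
    (E.foldl (pvStepB deg) q).keys =
      E.foldl (fun s e => ((PySem.Set.add (PySem.Set.add s (e.1, e.1)) (e.2, e.2)).add (e.1, e.2)))
        q.keys := by
  induction E generalizing q with
  | nil => rfl
  | cons e E ih =>
    rw [List.foldl_cons, List.foldl_cons, ih]
    congr 1
    simp [pvStepB, pvKeys_insert]

lemma pvNodupA (E : List (Int × Int)) (q : PySem.Dict (Int × Int) Int) (h : q.keys.Nodup) :
    (E.foldl pvStepA q).keys.Nodup := by
  induction E generalizing q with
  | nil => simpa
  | cons e E ih =>
    rw [List.foldl_cons]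
    exact ih _ (by
      simp only [pvStepA]
      exact PySem.Dict.nodup_keys_insert _ _ _ (PySem.Dict.nodup_keys_insert _ _ _
        (PySem.Dict.nodup_keys_insert _ _ _ h)))

lemma pvNodupB (deg : PySem.Dict Int Int) (E : List (Int × Int)) (q : PySem.Dict (Int × Int) Int)
    (h : q.keys.Nodup) : (E.foldl (pvStepB deg) q).keys.Nodup := by
  induction E generalizing q with
  | nil => simpa
  | cons e E ih =>
    rw [List.foldl_cons]
    exact ih _ (PySem.Dict.nodup_keys_insert _ _ _ (PySem.Dict.nodup_keys_insert _ _ _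
      (PySem.Dict.nodup_keys_insert _ _ _ h)))

lemma pvMem_keys (E : List (Int × Int)) (s : List (Int × Int)) (k : Int × Int)
    (hk : k ∈ E.foldl (fun s e =>
      ((PySem.Set.add (PySem.Set.add s (e.1, e.1)) (e.2, e.2)).add (e.1, e.2))) s) :
    k ∈ s ∨ ∃ e ∈ E, k = (e.1, e.1) ∨ k = (e.2, e.2) ∨ k = e := by
  induction E generalizing s with
  | nil => exact Or.inl hk
  | cons e E ih =>
    rw [List.foldl_cons] at hk
    rcases ih _ hk with h | ⟨e', he', h⟩
    · rw [PySem.Set.mem_add] at h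
      rcases h with h | h
      · rw [PySem.Set.mem_add] at h
        rcases h with h | h
        · rw [PySem.Set.mem_add] at h
          rcases h with h | h
          · exact Or.inl h
          · exact Or.inr ⟨e, List.mem_cons_self, Or.inl h⟩
        · exact Or.inr ⟨e, List.mem_cons_self, Or.inr (Or.inl h)⟩
      · exact Or.inr ⟨e, List.mem_cons_self, Or.inr (Or.inr h)⟩
    · exact Or.inr ⟨e', List.mem_cons_of_mem _ he', h⟩

lemma pvStepA_diag (q : PySem.Dict (Int × Int) Int) (e : Int × Int) (he : e.1 < e.2) (x : Int) :
    (pvStepA q e).getD (x, x) 0 =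
      q.getD (x, x) 0 - ((if e.1 = x then 1 else 0) + (if e.2 = x then 1 else 0)) := by
  have hne : e.1 ≠ e.2 := ne_of_lt he
  by_cases h1 : e.1 = x <;> by_cases h2 : e.2 = x <;>
    simp [pvStepA, PySem.Dict.getD_insert, Prod.ext_iff, h1, h2, hne] <;>
    first | omega | (intro h'; omega) | (split_ifs <;> omega)

lemma pvStepA_off (q : PySem.Dict (Int × Int) Int) (e : Int × Int) (he : e.1 < e.2)
    (x y : Int) (hxy : x < y) :
    (pvStepA q e).getD (x, y) 0 =
      q.getD (x, y) 0 + (if e = (x, y) then 2 else 0) := by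
  by_cases h : e = (x, y)
  · subst h
    simp [pvStepA, PySem.Dict.getD_insert, Prod.ext_iff, ne_of_lt he] <;>
      first | omega | (intro h'; omega) | (split_ifs <;> omega)
  · have hne : ¬(x = e.1 ∧ y = e.2) := by
      intro ⟨a, b⟩; exact h (by cases e; simp_all)
    simp [pvStepA, PySem.Dict.getD_insert, Prod.ext_iff, h, hne] <;>
      first | omega | (intro h'; omega) | (split_ifs <;> omega)

lemma pvStepB_diag (deg : PySem.Dict Int Int) (q : PySem.Dict (Int × Int) Int) (e : Int × Int)
    (he : e.1 < e.2) (x : Int) :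
    (pvStepB deg q e).getD (x, x) 0 =
      if e.1 = x ∨ e.2 = x then -(deg.getD x 0) else q.getD (x, x) 0 := by
  have hne : e.1 ≠ e.2 := ne_of_lt he
  by_cases h1 : e.1 = x <;> by_cases h2 : e.2 = x <;>
    simp [pvStepB, PySem.Dict.getD_insert, Prod.ext_iff, h1, h2, hne] <;>
    first | omega | (intro h'; omega) | (split_ifs <;> omega)

lemma pvStepB_off (deg : PySem.Dict Int Int) (q : PySem.Dict (Int × Int) Int) (e : Int × Int)
    (he : e.1 < e.2) (x y : Int) (hxy : x < y) :
    (pvStepB deg q e).getD (x, y) 0 = if e = (x, y) then 2 else q.getD (x, y) 0 := by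
  by_cases h : e = (x, y)
  · subst h; simp [pvStepB, PySem.Dict.getD_insert]
  · have hne : ¬(x = e.1 ∧ y = e.2) := by
      intro ⟨a, b⟩; exact h (by cases e; simp_all)
    simp [pvStepB, PySem.Dict.getD_insert, Prod.ext_iff, h, hne] <;>
      first | omega | (intro h'; omega) | (split_ifs <;> omega)

lemma pvA_getD_diag (E : List (Int × Int)) (hE : ∀ e ∈ E, e.1 < e.2)
    (q : PySem.Dict (Int × Int) Int) (x : Int) :
    (E.foldl pvStepA q).getD (x, x) 0 = q.getD (x, x) 0 - pvCnt E x := by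
  induction E generalizing q with
  | nil => simp [pvCnt]
  | cons e E ih =>
    rw [List.foldl_cons, ih (fun e he => hE e (List.mem_cons_of_mem _ he)),
      pvStepA_diag q e (hE e List.mem_cons_self) x]
    simp only [pvCnt, List.flatMap_cons, List.count_append, List.count_cons, List.count_nil,
      beq_iff_eq]
    split_ifs <;> simp_all <;> omega

lemma pvA_getD_off (E : List (Int × Int)) (hE : ∀ e ∈ E, e.1 < e.2)
    (q : PySem.Dict (Int × Int) Int) (x y : Int) (hxy : x < y) :
    (E.foldl pvStepA q).getD (x, y) 0 = q.getD (x, y) 0 + 2 * E.count (x, y) := by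
  induction E generalizing q with
  | nil => simp
  | cons e E ih =>
    rw [List.foldl_cons, ih (fun e he => hE e (List.mem_cons_of_mem _ he)),
      pvStepA_off q e (hE e List.mem_cons_self) x y hxy]
    simp only [List.count_cons, beq_iff_eq]
    split_ifs <;> simp_all <;> omega

lemma pvB_getD_diag (deg : PySem.Dict Int Int) (E : List (Int × Int)) (hE : ∀ e ∈ E, e.1 < e.2)
    (q : PySem.Dict (Int × Int) Int) (x : Int) :
    (E.foldl (pvStepB deg) q).getD (x, x) 0 =
      if ∃ e ∈ E, e.1 = x ∨ e.2 = x then -(deg.getD x 0) else q.getD (x, x) 0 := by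
  induction E generalizing q with
  | nil => simp
  | cons e E ih =>
    rw [List.foldl_cons, ih (fun e he => hE e (List.mem_cons_of_mem _ he)),
      pvStepB_diag deg q e (hE e List.mem_cons_self) x]
    have hiff : (∃ e1 ∈ e :: E, e1.1 = x ∨ e1.2 = x) ↔
        ((e.1 = x ∨ e.2 = x) ∨ ∃ e' ∈ E, e'.1 = x ∨ e'.2 = x) := by
      constructor
      · rintro ⟨e1, h, p⟩
        rcases List.mem_cons.mp h with rfl | h
        · exact Or.inl p
        · exact Or.inr ⟨e1, h, p⟩
      · rintro (p | ⟨e1, h, p⟩)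
        · exact ⟨e, List.mem_cons_self, p⟩
        · exact ⟨e1, List.mem_cons_of_mem _ h, p⟩
    rw [if_congr hiff rfl rfl]
    by_cases h1 : ∃ e' ∈ E, e'.1 = x ∨ e'.2 = x <;> by_cases h2 : e.1 = x ∨ e.2 = x <;>
      simp [h1, h2]

lemma pvB_getD_off (deg : PySem.Dict Int Int) (E : List (Int × Int)) (hE : ∀ e ∈ E, e.1 < e.2)
    (q : PySem.Dict (Int × Int) Int) (x y : Int) (hxy : x < y) :
    (E.foldl (pvStepB deg) q).getD (x, y) 0 =
      if (x, y) ∈ E then 2 else q.getD (x, y) 0 := by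
  induction E generalizing q with
  | nil => simp
  | cons e E ih =>
    rw [List.foldl_cons, ih (fun e he => hE e (List.mem_cons_of_mem _ he)),
      pvStepB_off deg q e (hE e List.mem_cons_self) x y hxy]
    by_cases h1 : (x, y) ∈ E
    · simp [h1, List.mem_cons]
    · by_cases h2 : e = (x, y)
      · simp [h1, h2, List.mem_cons]
      · have h2' : ¬((x, y) = e) := fun h => h2 h.symm
        simp [h1, h2, h2', List.mem_cons]

-- ===== VERDICT (by name: the statement is the Claim_ definition above) =====
theorem max_cut_qubo_spec : Claim_equal_max_cut_qubo := by
  intro m _ _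
  unfold Spec_max_cut_qubo
  rw [pvA_eq_fold, pvB_eq_fold]
  apply congrArg
  apply congrArg
  have hlt := pvEdges_lt m
  have hnd := pvEdges_nodup m
  set E := pvEdges m with hEdef
  set deg : PySem.Dict Int Int := E.foldl (fun d e =>
    let d1 := d.insert e.1 (d.getD e.1 0 + 1)
    d1.insert e.2 (d1.getD e.2 0 + 1)) PySem.Dict.empty with hdeg
  have hdegx : ∀ x, deg.getD x 0 = (pvCnt E x : Int) := by
    intro x; rw [hdeg, pvDeg_getD]; simp [PySem.Dict.getD_empty]
  apply PySem.Dict.ext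
  rw [PySem.Dict.items_eq_map_keys _ (pvNodupA E _ PySem.Dict.nodup_keys_empty) 0,
    PySem.Dict.items_eq_map_keys _ (pvNodupB deg E _ PySem.Dict.nodup_keys_empty) 0,
    pvKeysA, pvKeysB]
  apply List.map_congr_left
  intro k hk
  rcases pvMem_keys E _ k hk with h | ⟨e, heE, hke⟩
  · simp [PySem.Dict.keys_empty] at h
  · have he := hlt e heE
    refine Prod.ext rfl ?_
    simp only
    rcases hke with rfl | rfl | rfl
    · rw [pvA_getD_diag E hlt _ e.1, pvB_getD_diag deg E hlt _ e.1,
        if_pos ⟨e, heE, Or.inl rfl⟩, hdegx]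
      simp [PySem.Dict.getD_empty]
    · rw [pvA_getD_diag E hlt _ e.2, pvB_getD_diag deg E hlt _ e.2,
        if_pos ⟨e, heE, Or.inr rfl⟩, hdegx]
      simp [PySem.Dict.getD_empty]
    · obtain ⟨a, b⟩ := k
      rw [pvA_getD_off E hlt _ a b he, pvB_getD_off deg E hlt _ a b he,
        if_pos heE, List.count_eq_one_of_mem hnd heE]
      simp [PySem.Dict.getD_empty]
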